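-- pv_equiv track=rewrite | github.com/Thyagaraajan/ir | min_hash.py | docToShringle
-- ===== SOURCE A (Python) =====
-- def docToShringle(documents, k):
--     shringleSet = []
--
--     for key in documents:
--         doc = documents[key]
--         words = doc.split()
--
--         for i in range(len(words) - k + 1):
--             shringle = ""
--             for j in range(i,i+k):
--                 word = words[j]
--                 shringle += word
--                 if j < i + k -1:
--                     shringle += " "
--
--             if shringle not in shringleSet:
--                 shringleSet.append(shringle)
--
--     return shringleSet
-- ===== SOURCE B (Python) =====
-- def docToShringle(documents, k):
--     # Phase 1: generate shingles by PEELING — keep joining the first k words of a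
--     # shrinking suffix instead of indexing windows with nested ranges.
--     pending = []
--     for key in documents:
--         words = documents[key].split()
--         n = len(words) - k + 1
--         while n > 0:
--             pending.append(" ".join(words[:k]))
--             words = words[1:]
--             n -= 1
--     # Phase 2: partition-style dedup — emit the head, filter all its duplicates
--     # out of the rest, repeat (no membership tests against the growing output).
--     out = []
--     while pending:
--         h = pending[0]
--         out.append(h)
--         pending = [x for x in pending[1:] if x != h]
--     return out
-- ===== Notes on version B (the rewrite author's own statement) =====
-- stated objective: alternative
-- what changed: Replaces A's nested index-range loops with inline membership-checked accumulation by a two-phase shape: a peeling generator that joins the first k words of a shrinking suffix (words = words[1:]) into one flat list, then a partition-style dedup loop that emits the head and filters all its duplicates out of the rest, eliminating membership tests against the growing result.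
-- outside the precondition, e.g. on docToShringle({'a': 'x y z'}, -1): A returns [''], B returns ['x y', 'y', '']
import Mathlib
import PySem

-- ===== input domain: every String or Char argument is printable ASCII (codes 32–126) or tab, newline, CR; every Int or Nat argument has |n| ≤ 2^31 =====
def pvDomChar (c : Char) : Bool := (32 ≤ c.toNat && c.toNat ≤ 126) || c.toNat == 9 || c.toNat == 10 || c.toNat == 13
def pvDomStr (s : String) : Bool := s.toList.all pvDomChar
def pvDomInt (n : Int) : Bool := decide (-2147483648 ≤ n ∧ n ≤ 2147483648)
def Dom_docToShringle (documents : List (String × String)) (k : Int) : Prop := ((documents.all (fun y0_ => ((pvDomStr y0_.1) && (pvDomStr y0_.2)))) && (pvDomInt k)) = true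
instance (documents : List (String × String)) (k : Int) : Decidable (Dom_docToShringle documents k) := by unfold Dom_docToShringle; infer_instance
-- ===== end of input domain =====

-- B replaces A's nested index loops with inline dedup by a peeling generator (join the first k
-- words of a shrinking suffix) followed by one partition-style dedup pass (emit head, filter
-- its duplicates out of the rest) — no membership tests against the growing result.

-- ===== PORT A =====
def docToShringle (documents : List (String × String)) (k : Int) : List String :=
  documents.foldl (fun shringleSet kv =>
    let doc := (documents.lookup kv.1).getD ""   -- documents[key]: key comes from the iteration, always present
    let words := PySem.Str.split₀ doc
    (PySem.List.pyRange 0 ((words.length : Int) - k + 1) 1).foldl (fun ss i =>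
      let shringle :=
        (PySem.List.pyRange i (i + k) 1).foldl (fun sh j =>
          let sh := sh ++ PySem.List.pyGetD words j ""   -- words[j]: j < i+k ≤ len(words) whenever the range is nonempty
          if j < i + k - 1 then sh ++ " " else sh) ""
      if shringle ∈ ss then ss else ss ++ [shringle]) shringleSet) []

-- ===== PORT B =====
-- inner while loop: append " ".join(words[:k]), peel words = words[1:], n -= 1
def pvPeel (k : Int) (pending : List String) (words : List String) (n : Int) : List String :=
  if n ≤ 0 then pending
  else pvPeel k (pending ++ [PySem.Str.join " " (PySem.List.slice words none (some k))])
       (PySem.List.slice words (some 1) none) (n - 1)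
termination_by n.toNat
decreasing_by omega

-- final while loop: emit head, filter its duplicates out of the rest, repeat
def pvDedupe (pending : List String) (out : List String) : List String :=
  match pending with
  | [] => out
  | h :: t => pvDedupe (t.filter (fun y => y ≠ h)) (out ++ [h])
termination_by pending.length
decreasing_by
  simp only [List.length_cons, List.unattach, List.length_map]
  exact Nat.lt_succ_of_le (le_trans (List.length_filter_le _ _) (le_of_eq List.length_attach))

def docToShringle_alt (documents : List (String × String)) (k : Int) : List String :=
  let pending := documents.foldl (fun pending kv =>
    let words := PySem.Str.split₀ ((documents.lookup kv.1).getD "")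
    pvPeel k pending words ((words.length : Int) - k + 1)) []
  pvDedupe pending []

-- ===== PRECONDITION & SPEC =====
-- Pre_ excludes negative k (on which A still returns ['']): there A's inner range is empty so every
-- shingle is the empty string, while B's slice words[:k] reads the negative stop from the end of
-- the word list — both values are accidents of a parameter no caller of a k-shingler would pass.
def Pre_docToShringle (documents : List (String × String)) (k : Int) : Prop := 0 ≤ k
instance (documents : List (String × String)) (k : Int) : Decidable (Pre_docToShringle documents k) := by unfold Pre_docToShringle; infer_instance
def pvWitness_docToShringle : (List (String × String)) × Int := ([("a", "x y z")], 2)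
def Spec_docToShringle (documents : List (String × String)) (k : Int) (out : List String) : Prop := out = docToShringle_alt documents k
instance (documents : List (String × String)) (k : Int) (out : List String) : Decidable (Spec_docToShringle documents k out) := by unfold Spec_docToShringle; infer_instance

-- ===== CLAIM (what is proved, stated in full; the proofs are below) =====
def Claim_equal_docToShringle : Prop := ∀ (documents : List (String × String)) (k : Int), Dom_docToShringle documents k → Pre_docToShringle documents k → Spec_docToShringle documents k (docToShringle documents k)

-- ===== LEMMAS AND PROOFS =====

theorem pvRangeNil (a b : Int) (h : b ≤ a) : PySem.List.pyRange a b 1 = [] := by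
  rw [List.eq_nil_iff_forall_not_mem]; intro x hx; rw [PySem.List.mem_pyRange_one] at hx; omega

-- A's inner character loop builds exactly ' '.join(words[i:i+k]) (stated with e = i + k).
theorem pvBuild (ws : List String) (n : Nat) : ∀ (i e : Int) (pre : String), 0 ≤ i → i + n = e → e ≤ (ws.length : Int) →
    (PySem.List.pyRange i e 1).foldl (fun sh j =>
        let sh := sh ++ PySem.List.pyGetD ws j ""
        if j < e - 1 then sh ++ " " else sh) pre
      = pre ++ PySem.Str.join " " (PySem.List.slice ws (some i) (some e)) := by
  induction n with
  | zero =>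
    intro i e pre hi he hlen
    have hei : e = i := by omega
    subst hei
    rw [PySem.List.slice_toNat (xs := ws) hi hi]
    have h0 : PySem.List.pyRange e e 1 = [] := pvRangeNil e e le_rfl
    rw [h0]
    simp only [List.foldl_nil, Nat.sub_self, List.take_zero]
    apply String.toList_inj.mp
    simp [String.toList_append, PySem.Str.toList_join, PySem.Chars.join_nil]
  | succ n ih =>
    intro i e pre hi he hlen
    have hlt : i < e := by omega
    have hidx : i.toNat < ws.length := by omega
    rw [PySem.List.pyRange_one_cons hlt]
    simp only [List.foldl_cons]
    rw [PySem.List.pyGetD_eq_getElem ws "" hi (by omega)]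
    have hslice : PySem.List.slice ws (some i) (some e) = ws[i.toNat] :: PySem.List.slice ws (some (i + 1)) (some e) := by
      rw [PySem.List.slice_toNat (xs := ws) hi (by omega), PySem.List.slice_toNat (xs := ws) (by omega) (by omega)]
      rw [List.drop_eq_getElem_cons hidx]
      have h1 : e.toNat - i.toNat = (e.toNat - (i + 1).toNat) + 1 := by omega
      have h2 : (i + 1).toNat = i.toNat + 1 := by omega
      rw [h1, List.take_succ_cons, h2]
    rw [hslice]
    by_cases hn : n = 0
    · subst hn
      have hc : ¬ (i < e - 1) := by omega
      rw [if_neg hc]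
      have hr : PySem.List.pyRange (i + 1) e 1 = [] := by
        have : e = i + 1 := by omega
        subst this; exact pvRangeNil _ _ le_rfl
      have hs : PySem.List.slice ws (some (i + 1)) (some e) = [] := by
        rw [PySem.List.slice_toNat (xs := ws) (by omega) (by omega)]
        have : e.toNat - (i + 1).toNat = 0 := by omega
        rw [this, List.take_zero]
      rw [hr, hs]
      simp only [List.foldl_nil]
      apply String.toList_inj.mp
      simp [String.toList_append, PySem.Str.toList_join, PySem.Chars.join_singleton]
    · have hc : i < e - 1 := by omega
      rw [if_pos hc]
      rw [ih (i + 1) e (pre ++ ws[i.toNat] ++ " ") (by omega) (by omega) hlen]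
      obtain ⟨y, t, hyt⟩ : ∃ y t, PySem.List.slice ws (some (i + 1)) (some e) = y :: t := by
        have hlen' : (PySem.List.slice ws (some (i + 1)) (some e)).length = e.toNat - (i + 1).toNat := by
          rw [PySem.List.slice_toNat (xs := ws) (by omega) (by omega)]
          simp
          omega
        cases hsl : PySem.List.slice ws (some (i + 1)) (some e) with
        | nil => rw [hsl] at hlen'; simp at hlen'; omega
        | cons y t => exact ⟨y, t, rfl⟩
      rw [hyt]
      apply String.toList_inj.mp
      simp [String.toList_append, PySem.Str.toList_join, PySem.Chars.join_cons_cons]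

-- B's peeling loop appends ' '.join((ws.drop m).take k) for m = 0 … n-1 to its accumulator.
theorem pvPeelEq (k : Int) (hk : 0 ≤ k) : ∀ (f : Nat) (n : Int) (ws acc : List String), n.toNat = f →
    pvPeel k acc ws n = acc ++ (List.range n.toNat).map (fun m => PySem.Str.join " " ((ws.drop m).take k.toNat)) := by
  intro f
  induction f with
  | zero =>
    intro n ws acc hn
    rw [pvPeel, if_pos (by omega), hn]
    simp
  | succ f ih =>
    intro n ws acc hn
    rw [pvPeel, if_neg (by omega)]
    have hslk : PySem.List.slice ws none (some k) = ws.take k.toNat := by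
      have hkk : k = ((k.toNat : Nat) : Int) := by omega
      rw [hkk, PySem.List.slice_to_natCast, Int.toNat_natCast]
    have h1 : (n - 1).toNat = f := by omega
    rw [hslk, PySem.List.slice_from_one, ih (n - 1) ws.tail _ (by omega), hn, h1,
        List.range_succ_eq_map, List.map_cons, List.map_map, List.append_assoc, List.singleton_append]
    refine congrArg (acc ++ ·) (congrArg₂ List.cons (by simp) ?_)
    apply List.map_congr_left
    intro m _
    have hdt : ws.tail.drop m = ws.drop (m + 1) := by
      rw [← List.drop_one, List.drop_drop, Nat.add_comm]
    simp [Function.comp, hdt]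

-- Each document's shingle list in A's indexed form equals B's peeled form.
theorem pvDocListEq (k : Int) (hk : 0 ≤ k) (ws : List String) :
    (PySem.List.pyRange 0 ((ws.length : Int) - k + 1) 1).map
        (fun i => PySem.Str.join " " (PySem.List.slice ws (some i) (some (i + k))))
      = (List.range ((ws.length : Int) - k + 1).toNat).map
          (fun m => PySem.Str.join " " ((ws.drop m).take k.toNat)) := by
  rw [PySem.List.pyRange_one, List.map_map]
  simp only [sub_zero]
  apply List.map_congr_left
  intro m _
  simp only [Function.comp_apply, zero_add]
  have hik : ((m : Int)) + k = ((m : Nat) : Int) + ((k.toNat : Nat) : Int) := by omega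
  rw [hik, PySem.List.slice_natCast_add]

-- A's accumulator fold is a filter followed by B's partition dedup.
theorem pvFoldDedup : ∀ (L acc : List String),
    L.foldl (fun ss s => if s ∈ ss then ss else ss ++ [s]) acc
      = pvDedupe (L.filter (fun x => x ∉ acc)) acc := by
  intro L
  induction L with
  | nil => intro acc; simp [pvDedupe]
  | cons x t ih =>
    intro acc
    by_cases hx : x ∈ acc
    · rw [List.foldl_cons, if_pos hx, ih acc, List.filter_cons_of_neg (by simp [hx])]
    · rw [List.foldl_cons, if_neg hx, ih (acc ++ [x]), List.filter_cons_of_pos (by simp [hx])]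
      rw [pvDedupe, List.filter_filter]
      congr 1
      apply List.filter_congr
      intro y _
      simp [List.mem_append, Bool.and_comm]

-- ===== VERDICT (by name: the statement is the Claim_ definition above) =====
theorem docToShringle_spec : Claim_equal_docToShringle := by
  intro documents k _hdom hk
  unfold Pre_docToShringle at hk
  have hinner : ∀ (ws : List String) (ss : List String),
      (PySem.List.pyRange 0 ((ws.length : Int) - k + 1) 1).foldl (fun ss i =>
        let shringle := (PySem.List.pyRange i (i + k) 1).foldl (fun sh j =>
            let sh := sh ++ PySem.List.pyGetD ws j ""
            if j < i + k - 1 then sh ++ " " else sh) ""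
        if shringle ∈ ss then ss else ss ++ [shringle]) ss
    = ((PySem.List.pyRange 0 ((ws.length : Int) - k + 1) 1).map
        (fun i => PySem.Str.join " " (PySem.List.slice ws (some i) (some (i + k))))).foldl
        (fun ss s => if s ∈ ss then ss else ss ++ [s]) ss := by
    intro ws ss
    rw [List.foldl_map]
    apply PySem.List.foldl_congr_mem
    intro acc i hi
    rw [PySem.List.mem_pyRange_one] at hi
    simp only []
    rw [pvBuild ws k.toNat i (i + k) "" hi.1 (by omega) (by omega), String.empty_append]
  have key : ∀ (ds : List (String × String)) (init : List String),
      ds.foldl (fun shringleSet kv =>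
        (PySem.List.pyRange 0 (((PySem.Str.split₀ ((documents.lookup kv.1).getD "")).length : Int) - k + 1) 1).foldl (fun ss i =>
          let shringle := (PySem.List.pyRange i (i + k) 1).foldl (fun sh j =>
              let sh := sh ++ PySem.List.pyGetD (PySem.Str.split₀ ((documents.lookup kv.1).getD "")) j ""
              if j < i + k - 1 then sh ++ " " else sh) ""
          if shringle ∈ ss then ss else ss ++ [shringle]) shringleSet) init
    = (ds.flatMap (fun kv =>
        (PySem.List.pyRange 0 (((PySem.Str.split₀ ((documents.lookup kv.1).getD "")).length : Int) - k + 1) 1).map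
          (fun i => PySem.Str.join " " (PySem.List.slice (PySem.Str.split₀ ((documents.lookup kv.1).getD "")) (some i) (some (i + k)))))).foldl
        (fun ss s => if s ∈ ss then ss else ss ++ [s]) init := by
    intro ds
    induction ds with
    | nil => intro init; simp
    | cons d t ih =>
      intro init
      rw [List.foldl_cons, List.flatMap_cons, List.foldl_append]
      rw [← hinner (PySem.Str.split₀ ((documents.lookup d.1).getD "")) init]
      exact ih _
  have hgen :
      documents.foldl (fun pending kv =>
        pvPeel k pending (PySem.Str.split₀ ((documents.lookup kv.1).getD ""))
          (((PySem.Str.split₀ ((documents.lookup kv.1).getD "")).length : Int) - k + 1)) []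
    = documents.flatMap (fun kv =>
        (PySem.List.pyRange 0 (((PySem.Str.split₀ ((documents.lookup kv.1).getD "")).length : Int) - k + 1) 1).map
          (fun i => PySem.Str.join " " (PySem.List.slice (PySem.Str.split₀ ((documents.lookup kv.1).getD "")) (some i) (some (i + k))))) := by
    rw [PySem.List.foldl_congr_mem (g := fun pending kv =>
        pending ++ (PySem.List.pyRange 0 (((PySem.Str.split₀ ((documents.lookup kv.1).getD "")).length : Int) - k + 1) 1).map
          (fun i => PySem.Str.join " " (PySem.List.slice (PySem.Str.split₀ ((documents.lookup kv.1).getD "")) (some i) (some (i + k)))))]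
    · exact PySem.List.foldl_append_eq_flatMap _ documents []
    · intro acc kv _
      rw [pvDocListEq k hk, pvPeelEq k hk _ _ _ _ rfl]
  show docToShringle documents k = docToShringle_alt documents k
  unfold docToShringle docToShringle_alt
  simp only []
  rw [key documents [], hgen, pvFoldDedup]
  simp
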